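-- pv_equiv track=rewrite | github.com/dnskrslnkv/algo | PrefixSumsAndTwoPointers/zero-sum segments.py | countprefixsum
-- ===== SOURCE A (Python) =====
-- def countprefixsum(arr: list) -> dict:
--     prefixsumbyvalue = {0: 1}
--     nowsum = 0
--     for el in arr:
--         nowsum += el
--         if nowsum not in prefixsumbyvalue:
--             prefixsumbyvalue[nowsum] = 0
--         prefixsumbyvalue[nowsum] += 1
--     return prefixsumbyvalue
-- ===== SOURCE B (Python) =====
-- def countprefixsum(arr: list) -> dict:
--     prefixes = [sum(arr[:i]) for i in range(len(arr) + 1)]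
--     return {p: prefixes.count(p) for p in prefixes}
-- ===== Notes on version B (the rewrite author's own statement) =====
-- stated objective: simpler
-- what changed: A counts incrementally in one pass with a running sum and a membership-guarded dict update; B has no running counter at all: it computes each prefix sum independently as sum(arr[:i]) and sets each dict value by a full-scan prefixes.count(p), relying on dict-comprehension overwrite to keep first-appearance order.
import Mathlib
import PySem

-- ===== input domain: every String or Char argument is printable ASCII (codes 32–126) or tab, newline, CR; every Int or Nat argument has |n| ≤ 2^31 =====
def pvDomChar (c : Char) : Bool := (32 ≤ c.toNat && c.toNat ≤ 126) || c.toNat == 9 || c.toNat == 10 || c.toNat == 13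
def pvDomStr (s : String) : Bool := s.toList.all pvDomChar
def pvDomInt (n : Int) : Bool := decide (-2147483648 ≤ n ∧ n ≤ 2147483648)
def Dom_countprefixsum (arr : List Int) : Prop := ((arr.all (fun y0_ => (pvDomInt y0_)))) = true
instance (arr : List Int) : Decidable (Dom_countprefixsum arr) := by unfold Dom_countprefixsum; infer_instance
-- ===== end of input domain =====

-- B drops A's running counter: it recomputes each prefix sum from a slice and tallies by full-scan counting (alternative decomposition, not faster).

-- ===== PORT A =====
def countprefixsum (arr : List Int) : List (Int × Int) :=
  let init : PySem.Dict Int Int × Int := (PySem.Dict.ofList [(0, 1)], 0)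
  let st := arr.foldl (fun (st : PySem.Dict Int Int × Int) el =>
    let nowsum := st.2 + el
    let d := if st.1.contains nowsum then st.1 else st.1.insert nowsum 0
    (d.modify nowsum 0 (· + 1), nowsum)) init
  st.1.items

-- ===== PORT B =====
def countprefixsum_alt (arr : List Int) : List (Int × Int) :=
  let prefixes := (PySem.List.pyRange 0 ((arr.length : Int) + 1) 1).map
    (fun i => (PySem.List.slice arr none (some i)).sum)
  (prefixes.foldl (fun d p => d.insert p ((prefixes.count p : Int))) PySem.Dict.empty).items

-- ===== PRECONDITION & SPEC =====
def Spec_countprefixsum (arr : List Int) (out : List (Int × Int)) : Prop := out = countprefixsum_alt arr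
instance (arr : List Int) (out : List (Int × Int)) : Decidable (Spec_countprefixsum arr out) := by unfold Spec_countprefixsum; infer_instance

-- ===== CLAIM (what is proved, stated in full; the proofs are below) =====
def Claim_equal_countprefixsum : Prop := ∀ (arr : List Int), Dom_countprefixsum arr → Spec_countprefixsum arr (countprefixsum arr)

-- ===== LEMMAS AND PROOFS =====

/-- The running-sum list produced from start sum `s`. -/
def pvSums (arr : List Int) (s : Int) : List Int :=
  match arr with
  | [] => []
  | e :: t => (s + e) :: pvSums t (s + e)

/-- A's per-element dict update equals a plain counter bump. -/
theorem pvStepA (d : PySem.Dict Int Int) (k : Int) :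
    (if d.contains k then d else d.insert k 0).modify k 0 (· + 1)
      = d.modify k 0 (· + 1) := by
  by_cases h : d.contains k
  · simp [h]
  · have hf : d.contains k = false := by simpa using h
    simp only [hf, Bool.false_eq_true, if_false]
    simp [PySem.Dict.modify, PySem.Dict.getD_insert_self,
      PySem.Dict.insert_insert_self, PySem.Dict.getD_of_not_contains, hf]

/-- A's fold computes the counter fold over the running sums. -/
theorem pvFoldA (arr : List Int) (d : PySem.Dict Int Int) (s : Int) :
    (arr.foldl (fun (st : PySem.Dict Int Int × Int) el =>
        let nowsum := st.2 + el
        let d := if st.1.contains nowsum then st.1 else st.1.insert nowsum 0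
        (d.modify nowsum 0 (· + 1), nowsum)) (d, s))
      = ((pvSums arr s).foldl (fun d x => d.modify x 0 (· + 1)) d, s + (arr.sum)) := by
  induction arr generalizing d s with
  | nil => simp [pvSums]
  | cons e t ih =>
    rw [List.foldl_cons]
    have hstep : (let nowsum := (d, s).2 + e
        let d2 := if (d, s).1.contains nowsum then (d, s).1 else (d, s).1.insert nowsum 0
        (d2.modify nowsum 0 (· + 1), nowsum))
        = (d.modify (s + e) 0 (· + 1), s + e) := by
      simp only []
      rw [pvStepA]
    rw [hstep, ih]
    refine Prod.ext ?_ (by simp; ring)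
    simp [pvSums]

/-- The per-index prefix-sum table IS the running sums preceded by the start sum. -/
theorem pvTable (arr : List Int) (s : Int) :
    (List.range (arr.length + 1)).map (fun k => s + (arr.take k).sum)
      = s :: pvSums arr s := by
  induction arr generalizing s with
  | nil => simp [pvSums]
  | cons e t ih =>
    rw [List.length_cons, List.range_succ_eq_map, List.map_cons, List.map_map]
    have : ((fun k => s + ((e :: t).take k).sum) ∘ (· + 1))
        = fun k => (s + e) + (t.take k).sum := by
      funext k; simp [List.take_succ_cons]; ring
    rw [this, ih]
    simp [pvSums]

/-- A fold of constant-valued inserts looks up to the stored value. -/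
theorem pvGetDConst (f : Int → Int) (l : List Int) (d : PySem.Dict Int Int) (k : Int) :
    (l.foldl (fun d x => d.insert x (f x)) d).getD k 0
      = if k ∈ l then f k else d.getD k 0 := by
  induction l generalizing d with
  | nil => simp
  | cons x t ih =>
    rw [List.foldl_cons, ih]
    by_cases ht : k ∈ t
    · simp [ht]
    · by_cases hx : k = x
      · simp [hx, PySem.Dict.getD_insert_self]
      · simp [ht, PySem.Dict.getD_insert, hx]

/-- B's tally fold returns Counter(prefixes) as items. -/
theorem pvTally (P : List Int) :
    (P.foldl (fun d p => d.insert p ((P.count p : Int))) PySem.Dict.empty).items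
      = (PySem.Dict.counter P).items := by
  have hkeys : (P.foldl (fun d p => d.insert p ((P.count p : Int))) PySem.Dict.empty).keys
      = PySem.Set.ofList P := by
    rw [PySem.Dict.keys_foldl_insert]
    simp [PySem.Dict.keys_empty, PySem.Set.update_nil_left]
  have hnd : (P.foldl (fun d p => d.insert p ((P.count p : Int))) PySem.Dict.empty).keys.Nodup := by
    rw [hkeys]; exact PySem.Set.nodup_ofList P
  rw [PySem.Dict.items_eq_map_keys _ hnd 0, hkeys, PySem.Dict.items_counter]
  refine List.map_congr_left (fun k hk => ?_)
  have hmem : k ∈ P := (PySem.Set.mem_ofList P k).1 hk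
  rw [pvGetDConst]
  simp [hmem]

-- ===== VERDICT (by name: the statement is the Claim_ definition above) =====
theorem countprefixsum_spec : Claim_equal_countprefixsum := by
  intro arr _
  show countprefixsum arr = countprefixsum_alt arr
  unfold countprefixsum countprefixsum_alt
  simp only [pvFoldA]
  have hpre : (PySem.List.pyRange 0 ((arr.length : Int) + 1) 1).map
      (fun i => (PySem.List.slice arr none (some i)).sum)
      = (0 : Int) :: pvSums arr 0 := by
    rw [PySem.List.pyRange_one, List.map_map]
    have h1 : (((arr.length : Int) + 1 - 0).toNat) = arr.length + 1 := by omega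
    have h2 : ((fun i => (PySem.List.slice arr none (some i)).sum) ∘ (fun k : Nat => (0 : Int) + (k : Int)))
        = fun k : Nat => (0 : Int) + (arr.take k).sum := by
      funext k
      simp [PySem.List.slice_to_natCast]
    rw [h1, h2, pvTable]
  rw [hpre, pvTally]
  have h0 : PySem.Dict.ofList [((0 : Int), (1 : Int))]
      = PySem.Dict.counter [(0 : Int)] := by decide
  rw [h0]
  have : (pvSums arr 0).foldl (fun d x => PySem.Dict.modify d x 0 (· + 1))
        (PySem.Dict.counter [(0 : Int)])
      = PySem.Dict.counter ((0 : Int) :: pvSums arr 0) := by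
    simp [PySem.Dict.counter_eq_foldl]
  rw [this]
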